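-- pv_equiv track=rewrite | github.com/gnkm/AOJ_py | aoj/ITP1/_05_B/mycode.py | make_rectangle_lines
-- ===== SOURCE A (Python) =====
-- BOUNDARY = '#'
--
-- INSIDE = '.'
--
-- def make_rectangle_lines(H, W):
--     rectangle_lines = []
--     line_num = 1
--     for _ in range(1, H + 1):
--         col_num = 1
--         line_str = ''
--         for _ in range(1, W + 1):
--             if line_num == 1 or line_num == H:
--                 line_str += BOUNDARY
--             elif col_num == 1 or col_num == W:
--                 line_str += BOUNDARY
--             else:
--                 line_str += INSIDE
--
--             col_num += 1
--
--         rectangle_lines.append(line_str)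
--         line_num += 1
--
--     return rectangle_lines
-- ===== SOURCE B (Python) =====
-- def make_rectangle_lines(H, W):
--     if H <= 0:
--         return []
--     border = '#' * W
--     middle = '#' + '.' * (W - 2) + '#' if W >= 3 else border
--     if H <= 2:
--         return [border] * H
--     return [border] + [middle] * (H - 2) + [border]
-- ===== Notes on version B (the rewrite author's own statement) =====
-- stated objective: simpler
-- what changed: Replaced A's nested per-cell loops with line/column counters by two precomputed row templates (full border row and interior row) assembled via string and list replication; the per-character Python loop disappears, which also made B measurably faster (constant-factor).
import Mathlib
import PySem

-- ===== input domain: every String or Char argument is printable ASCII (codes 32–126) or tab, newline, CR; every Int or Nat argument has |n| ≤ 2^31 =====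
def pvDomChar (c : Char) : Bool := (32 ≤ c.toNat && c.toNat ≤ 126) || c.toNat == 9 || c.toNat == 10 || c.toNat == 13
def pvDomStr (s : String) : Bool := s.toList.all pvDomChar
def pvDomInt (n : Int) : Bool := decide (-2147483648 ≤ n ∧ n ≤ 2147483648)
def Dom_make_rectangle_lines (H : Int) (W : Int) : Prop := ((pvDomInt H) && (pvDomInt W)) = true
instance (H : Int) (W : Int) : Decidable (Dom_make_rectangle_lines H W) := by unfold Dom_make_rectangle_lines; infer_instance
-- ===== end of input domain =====

-- B replaces A's nested per-cell loops by two precomputed row templates (border/middle) plus list replication: simpler, no per-cell loop (timed measurably faster).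

-- ===== PORT A =====
-- literal transliteration of A: outer loop over range(1,H+1) with state (rectangle_lines, line_num),
-- inner loop over range(1,W+1) with state (line_str, col_num), same branch order
def make_rectangle_lines (H : Int) (W : Int) : List String :=
  ((PySem.List.pyRange 1 (H + 1) 1).foldl
    (fun (st : List String × Int) (_ : Int) =>
      let inner := (PySem.List.pyRange 1 (W + 1) 1).foldl
        (fun (st2 : String × Int) (_ : Int) =>
          (st2.1 ++ (if st.2 = 1 ∨ st.2 = H then "#"
                     else if st2.2 = 1 ∨ st2.2 = W then "#"
                     else "."),
           st2.2 + 1)) ("", 1)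
      (st.1 ++ [inner.1], st.2 + 1))
    (([] : List String), (1 : Int))).1

-- ===== PORT B =====
-- '#'*W / '.'*(W-2): Python string repetition with a non-positive count is '' — .toNat clamps exactly so
def make_rectangle_lines_alt (H : Int) (W : Int) : List String :=
  if H ≤ 0 then [] else
  let border := String.ofList (List.replicate W.toNat '#')
  let middle := if 3 ≤ W then "#" ++ String.ofList (List.replicate (W - 2).toNat '.') ++ "#" else border
  if H ≤ 2 then List.replicate H.toNat border
  else [border] ++ List.replicate (H - 2).toNat middle ++ [border]

-- ===== PRECONDITION & SPEC =====
def Spec_make_rectangle_lines (H : Int) (W : Int) (out : List String) : Prop := out = make_rectangle_lines_alt H W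
instance (H : Int) (W : Int) (out : List String) : Decidable (Spec_make_rectangle_lines H W out) := by unfold Spec_make_rectangle_lines; infer_instance

-- ===== CLAIM (what is proved, stated in full; the proofs are below) =====
def Claim_equal_make_rectangle_lines : Prop := ∀ (H : Int) (W : Int), Dom_make_rectangle_lines H W → Spec_make_rectangle_lines H W (make_rectangle_lines H W)

-- ===== LEMMAS AND PROOFS =====

-- the inner loop of A, as a function of the current line number
def pvInner (H W L : Int) : String :=
  ((PySem.List.pyRange 1 (W + 1) 1).foldl
    (fun (st2 : String × Int) (_ : Int) =>
      (st2.1 ++ (if L = 1 ∨ L = H then "#"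
                 else if st2.2 = 1 ∨ st2.2 = W then "#"
                 else "."),
       st2.2 + 1)) ("", 1)).1

-- generic "append f of a counter, n times" builders
def pvRowFrom (f : Int → String) (c : Int) : Nat → String
  | 0 => ""
  | n + 1 => f c ++ pvRowFrom f (c + 1) n

def pvRowsFrom (f : Int → String) (L : Int) : Nat → List String
  | 0 => []
  | n + 1 => f L :: pvRowsFrom f (L + 1) n

theorem foldl_str_counter (f : Int → String) :
    ∀ (l : List Int) (s : String) (c : Int),
      l.foldl (fun (st : String × Int) (_ : Int) => (st.1 ++ f st.2, st.2 + 1)) (s, c)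
        = (s ++ pvRowFrom f c l.length, c + l.length) := by
  intro l
  induction l with
  | nil => intro s c; simp [pvRowFrom]
  | cons x xs ih =>
      intro s c
      simp only [List.foldl_cons, List.length_cons, ih, pvRowFrom, String.append_assoc,
        Prod.mk.injEq]
      exact ⟨by trivial, by push_cast; ring⟩

theorem foldl_rows_counter (f : Int → String) :
    ∀ (l : List Int) (acc : List String) (L : Int),
      l.foldl (fun (st : List String × Int) (_ : Int) => (st.1 ++ [f st.2], st.2 + 1)) (acc, L)
        = (acc ++ pvRowsFrom f L l.length, L + l.length) := by
  intro l
  induction l with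
  | nil => intro acc L; simp [pvRowsFrom]
  | cons x xs ih =>
      intro acc L
      simp only [List.foldl_cons, List.length_cons, ih, pvRowsFrom, Prod.mk.injEq]
      exact ⟨by simp, by push_cast; ring⟩

theorem A_as_rows (H W : Int) :
    make_rectangle_lines H W = pvRowsFrom (pvInner H W) 1 ((H + 1 - 1).toNat) := by
  have h := congrArg Prod.fst
    (foldl_rows_counter (pvInner H W) (PySem.List.pyRange 1 (H + 1) 1) [] 1)
  rw [PySem.List.length_pyRange_one] at h
  simp only [List.nil_append] at h
  exact h

theorem inner_as_row (H W L : Int) :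
    pvInner H W L = pvRowFrom (fun c =>
      if L = 1 ∨ L = H then "#" else if c = 1 ∨ c = W then "#" else ".") 1 ((W + 1 - 1).toNat) := by
  have h := congrArg Prod.fst
    (foldl_str_counter (fun c => if L = 1 ∨ L = H then "#" else if c = 1 ∨ c = W then "#" else ".")
      (PySem.List.pyRange 1 (W + 1) 1) "" 1)
  rw [PySem.List.length_pyRange_one] at h
  simp only [String.empty_append] at h
  exact h

-- a constant-"#" row is the border string
theorem rowFrom_const_hash (f : Int → String) (hf : ∀ c, f c = "#") :
    ∀ (n : Nat) (c : Int), pvRowFrom f c n = String.ofList (List.replicate n '#') := by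
  intro n
  induction n with
  | zero => intro c; rfl
  | succ n ih =>
      intro c
      rw [pvRowFrom, hf, ih, List.replicate_succ,
        show ('#' :: List.replicate n '#') = ['#'] ++ List.replicate n '#' from rfl,
        String.ofList_append]

-- the tail of a middle row: dots then a closing '#'
theorem rowFrom_mid_tail (H W L : Int) (hL : ¬ (L = 1 ∨ L = H)) :
    ∀ (k : Nat) (c : Int), 2 ≤ c → c + k = W →
      pvRowFrom (fun c =>
        if L = 1 ∨ L = H then "#" else if c = 1 ∨ c = W then "#" else ".") c (k + 1)
        = String.ofList (List.replicate k '.') ++ "#" := by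
  intro k
  induction k with
  | zero =>
      intro c hc hw
      have hcW : c = W := by omega
      simp [pvRowFrom, hL, hcW]
  | succ k ih =>
      intro c hc hw
      rw [pvRowFrom, ih (c + 1) (by omega) (by omega)]
      have h1 : ¬ (c = 1 ∨ c = W) := by omega
      rw [if_neg hL, if_neg h1, List.replicate_succ,
        show ('.' :: List.replicate k '.') = ['.'] ++ List.replicate k '.' from rfl,
        String.ofList_append, String.append_assoc]

theorem row_eq (H W L : Int) :
    pvInner H W L
      = if L = 1 ∨ L = H then String.ofList (List.replicate W.toNat '#')
        else if 3 ≤ W then "#" ++ String.ofList (List.replicate (W - 2).toNat '.') ++ "#"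
        else String.ofList (List.replicate W.toNat '#') := by
  rw [inner_as_row, show (W + 1 - 1).toNat = W.toNat from by omega]
  by_cases hL : L = 1 ∨ L = H
  · rw [if_pos hL]
    exact rowFrom_const_hash _ (fun c => by simp [hL]) W.toNat 1
  · rw [if_neg hL]
    by_cases h3 : 3 ≤ W
    · rw [if_pos h3,
        show W.toNat = (W - 2).toNat + 1 + 1 from by omega, pvRowFrom,
        if_neg hL, if_pos (Or.inl rfl), show (1 : Int) + 1 = 2 from rfl,
        rowFrom_mid_tail H W L hL ((W - 2).toNat) 2 (by norm_num) (by omega),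
        String.append_assoc]
    · rw [if_neg h3]
      have h0 : W.toNat = 0 ∨ W = 1 ∨ W = 2 := by omega
      rcases h0 with h | h | h
      · rw [h]; rfl
      · subst h; simp [pvRowFrom, hL]
      · subst h
        simp only [show ((2 : Int)).toNat = 2 from rfl, pvRowFrom, if_neg hL,
          show (1 : Int) + 1 = 2 from rfl]
        norm_num
        decide

-- shape of the list of rows once every row is a border/middle template
theorem rows_shape (g : Int → String) (border middle : String) (H : Int)
    (hg : ∀ L, g L = if L = 1 ∨ L = H then border else middle) :
    pvRowsFrom g 1 H.toNat
      = if H ≤ 2 then List.replicate H.toNat border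
        else [border] ++ List.replicate (H - 2).toNat middle ++ [border] := by
  by_cases h2 : H ≤ 2
  · rw [if_pos h2]
    have h0 : H.toNat = 0 ∨ H = 1 ∨ H = 2 := by omega
    rcases h0 with h | h | h
    · rw [h]; rfl
    · subst h; simp [pvRowsFrom, hg]
    · subst h
      simp only [show ((2 : Int)).toNat = 2 from rfl, pvRowsFrom, hg,
        show (1 : Int) + 1 = 2 from rfl]
      norm_num [List.replicate_succ]
  · rw [if_neg h2]
    have tail : ∀ (k : Nat) (L : Int), 2 ≤ L → L + k = H →
        pvRowsFrom g L (k + 1) = List.replicate k middle ++ [border] := by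
      intro k
      induction k with
      | zero =>
          intro L hl hk
          have hLH : L = H := by omega
          simp [pvRowsFrom, hg, hLH]
      | succ k ih =>
          intro L hl hk
          rw [pvRowsFrom, ih (L + 1) (by omega) (by omega), hg]
          have hne : ¬ (L = 1 ∨ L = H) := by omega
          rw [if_neg hne, List.replicate_succ]
          rfl
    rw [show H.toNat = (H - 2).toNat + 1 + 1 from by omega, pvRowsFrom, hg,
      if_pos (Or.inl rfl), show (1 : Int) + 1 = 2 from rfl,
      tail ((H - 2).toNat) 2 (by norm_num) (by omega)]
    rfl

theorem make_rectangle_lines_eq_alt (H W : Int) :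
    make_rectangle_lines H W = make_rectangle_lines_alt H W := by
  by_cases h0 : H ≤ 0
  · unfold make_rectangle_lines_alt
    rw [if_pos h0, A_as_rows, show (H + 1 - 1).toNat = 0 from by omega]
    rfl
  · unfold make_rectangle_lines_alt
    rw [if_neg h0, A_as_rows, show (H + 1 - 1).toNat = H.toNat from by omega,
    rows_shape (pvInner H W)
      (String.ofList (List.replicate W.toNat '#'))
      (if 3 ≤ W then "#" ++ String.ofList (List.replicate (W - 2).toNat '.') ++ "#"
       else String.ofList (List.replicate W.toNat '#'))
      H (row_eq H W)]

-- ===== VERDICT (by name: the statement is the Claim_ definition above) =====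
theorem make_rectangle_lines_spec : Claim_equal_make_rectangle_lines := by
  intro H W _
  unfold Spec_make_rectangle_lines
  exact make_rectangle_lines_eq_alt H W
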